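-- pv_equiv track=rewrite | github.com/karlchencuhk/FamaFrenchChinaAshare | Time Split at 2000/Fama French 1992 (2000-2025)/scripts/02_build_june_chars_and_membership.py | decile_map
-- ===== SOURCE A (Python) =====
-- def decile_map(value_items):
--     # value_items: list[(key, value)]
--     pairs = sorted(value_items, key=lambda x: (x[1], x[0]))
--     n = len(pairs)
--     out = {}
--     if n == 0:
--         return out
--     for i, (k, _) in enumerate(pairs, start=1):
--         d = int((i - 1) * 10 / n) + 1
--         if d > 10:
--             d = 10
--         out[k] = d
--     return out
-- ===== SOURCE B (Python) =====
-- def decile_map(value_items):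
--     # Per-bucket block assignment: for each decile d, compute the sorted-index
--     # range [ceil(n*(d-1)/10), ceil(n*d/10)) that belongs to d and assign it wholesale.
--     pairs = sorted(value_items, key=lambda x: (x[1], x[0]))
--     n = len(pairs)
--     out = {}
--     if n == 0:
--         return out
--     end = 0
--     for d in range(1, 11):
--         start, end = end, (n * d + 9) // 10
--         for k, _ in pairs[start:end]:
--             out[k] = d
--     return out
-- ===== Notes on version B (the rewrite author's own statement) =====
-- stated objective: alternative
-- what changed: Replaces the per-element bucket formula int((i-1)*10/n)+1 (plus a dead d>10 cap) with a per-decile loop that computes each bucket's index range via ceiling division (n*d+9)//10 and assigns the whole slice at once.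
import Mathlib
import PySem

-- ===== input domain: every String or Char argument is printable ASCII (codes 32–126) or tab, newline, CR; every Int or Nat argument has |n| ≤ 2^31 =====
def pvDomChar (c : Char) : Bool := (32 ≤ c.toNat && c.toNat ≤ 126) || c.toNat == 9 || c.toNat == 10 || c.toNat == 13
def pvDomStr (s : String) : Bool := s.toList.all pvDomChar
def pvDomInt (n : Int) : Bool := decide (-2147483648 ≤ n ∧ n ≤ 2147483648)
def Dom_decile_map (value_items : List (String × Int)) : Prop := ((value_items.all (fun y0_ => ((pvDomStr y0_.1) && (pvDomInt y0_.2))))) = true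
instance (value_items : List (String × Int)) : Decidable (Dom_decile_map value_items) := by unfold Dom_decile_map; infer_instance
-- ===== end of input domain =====

-- B replaces A's per-element bucket formula by a per-decile loop that assigns each
-- decile's whole slice of the sorted list at once (objective: alternative decomposition).

-- ===== PORT A =====
-- 'int((i - 1) * 10 / n)' is float division then truncation in Python; for 0 ≤ (i-1)*10
-- and 0 < n it equals floor division, ported exactly as PySem.Int.floordiv.
def decile_map (value_items : List (String × Int)) : List (String × Int) :=
  let pairs := PySem.List.sorted2 value_items (fun x => x.2) (fun x => x.1)
  let n : Int := (pairs.length : Int)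
  if n == 0 then (PySem.Dict.empty : PySem.Dict String Int).items
  else ((PySem.List.enumerate pairs 1).foldl
      (fun (out : PySem.Dict String Int) ik =>
        let d : Int := PySem.Int.floordiv ((ik.1 - 1) * 10) n + 1
        let d : Int := if d > 10 then 10 else d
        out.insert ik.2.1 d)
      PySem.Dict.empty).items

-- ===== PORT B =====
def decile_map_alt (value_items : List (String × Int)) : List (String × Int) :=
  let pairs := PySem.List.sorted2 value_items (fun x => x.2) (fun x => x.1)
  let n : Int := (pairs.length : Int)
  if n == 0 then (PySem.Dict.empty : PySem.Dict String Int).items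
  else ((PySem.List.pyRange 1 11 1).foldl
      (fun (st : PySem.Dict String Int × Int) d =>
        let start := st.2
        let e := PySem.Int.floordiv (n * d + 9) 10
        ((PySem.List.slice pairs (some start) (some e)).foldl
          (fun (out : PySem.Dict String Int) kv => out.insert kv.1 d) st.1, e))
      ((PySem.Dict.empty : PySem.Dict String Int), 0)).1.items

-- ===== PRECONDITION & SPEC =====
def Spec_decile_map (value_items : List (String × Int)) (out : List (String × Int)) : Prop := out = decile_map_alt value_items
instance (value_items : List (String × Int)) (out : List (String × Int)) : Decidable (Spec_decile_map value_items out) := by unfold Spec_decile_map; infer_instance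

-- ===== CLAIM (what is proved, stated in full; the proofs are below) =====
def Claim_equal_decile_map : Prop := ∀ (value_items : List (String × Int)), Dom_decile_map value_items → Spec_decile_map value_items (decile_map value_items)

-- ===== LEMMAS AND PROOFS =====

-- decile boundary: 0-based index where decile d+1 starts (= ceil(N*d/10))
def pvC (N d : Nat) : Nat := (N * d + 9) / 10

-- A's per-element bucket value
def pvA (n i : Int) : Int :=
  let d : Int := PySem.Int.floordiv ((i - 1) * 10) n + 1
  if d > 10 then 10 else d

lemma pvC_mono (N d : Nat) : pvC N d ≤ pvC N (d + 1) := by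
  unfold pvC
  exact Nat.div_le_div_right (by nlinarith)

lemma pvC_le (N d : Nat) (hd : d ≤ 10) : pvC N d ≤ N := by
  unfold pvC
  have h : N * d ≤ 10 * N := by nlinarith
  omega

lemma pvC_zero (N : Nat) : pvC N 0 = 0 := by unfold pvC; omega

lemma pvC_ten (N : Nat) : pvC N 10 = N := by unfold pvC; omega

lemma pv_bucket_eq (N j d : Nat) (h1 : 1 ≤ d) (h10 : d ≤ 10) (hN : 0 < N)
    (hlo : pvC N (d - 1) ≤ j) (hhi : j < pvC N d) :
    pvA (N : Int) ((j : Int) + 1) = (d : Int) := by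
  have hmul : N * d = N * (d - 1) + N := by
    have : d - 1 + 1 = d := by omega
    calc N * d = N * (d - 1 + 1) := by rw [this]
    _ = N * (d - 1) + N := by ring
  have hlo' : N * (d - 1) ≤ 10 * j := by unfold pvC at hlo; omega
  have hhi' : 10 * j < N * d := by unfold pvC at hhi; omega
  have hdiv : (j * 10) / N = d - 1 := by
    have hle : d - 1 ≤ (j * 10) / N := (Nat.le_div_iff_mul_le hN).2 (by nlinarith)
    have hlt : (j * 10) / N < d := (Nat.div_lt_iff_lt_mul hN).2 (by nlinarith)
    omega
  unfold pvA
  have : ((j : Int) + 1 - 1) * 10 = ((j * 10 : Nat) : Int) := by push_cast; ring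
  rw [this, PySem.Int.floordiv_natCast, hdiv]
  have hc : ((d - 1 : Nat) : Int) = (d : Int) - 1 := by omega
  rw [hc]
  have : ¬ ((d : Int) - 1 + 1 > 10) := by omega
  simp only [this, if_false]
  omega

-- fold over the enumerated list where the function ignores the index
lemma pv_foldl_enumerate_snd {α β : Type} (xs : List α) (s : Int)
    (f : β → α → β) (init : β) :
    (PySem.List.enumerate xs s).foldl (fun acc ik => f acc ik.2) init = xs.foldl f init := by
  induction xs generalizing s init with
  | nil => simp [PySem.List.enumerate_nil]
  | cons x t ih => simp [PySem.List.enumerate_cons, ih]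

-- one decile step: A's fold over the tail starting at boundary d-1 equals
-- the block fold for decile d followed by A's fold over the tail at boundary d
lemma pv_step (L : List (String × Int)) (d : Nat) (h1 : 1 ≤ d) (h10 : d ≤ 10)
    (hN : 0 < L.length) (o : PySem.Dict String Int) :
    (PySem.List.enumerate (L.drop (pvC L.length (d - 1))) ((pvC L.length (d - 1) : Int) + 1)).foldl
        (fun out ik => out.insert ik.2.1 (pvA (L.length : Int) ik.1)) o
    = (PySem.List.enumerate (L.drop (pvC L.length d)) ((pvC L.length d : Int) + 1)).foldl
        (fun out ik => out.insert ik.2.1 (pvA (L.length : Int) ik.1))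
        (((L.drop (pvC L.length (d - 1))).take (pvC L.length d - pvC L.length (d - 1))).foldl
          (fun out kv => out.insert kv.1 (d : Int)) o) := by
  set N := L.length with hNdef
  set a := pvC N (d - 1) with ha
  set b := pvC N d with hb
  have hab : a ≤ b := by
    have := pvC_mono N (d - 1)
    have hd : d - 1 + 1 = d := by omega
    rw [hd] at this; exact this
  have hbN : b ≤ N := pvC_le N d h10
  have hsplit : L.drop a = (L.drop a).take (b - a) ++ L.drop b := by
    conv_lhs => rw [← List.take_append_drop (b - a) (L.drop a)]
    rw [List.drop_drop]
    have hba : a + (b - a) = b := by omega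
    rw [hba]
  have hlen : ((L.drop a).take (b - a)).length = b - a := by
    rw [List.length_take, List.length_drop]
    omega
  conv_lhs => rw [hsplit]
  rw [PySem.List.enumerate_append, List.foldl_append, hlen]
  have hstart : ((a : Int) + 1 + ((b - a : Nat) : Int)) = (b : Int) + 1 := by omega
  rw [hstart]
  congr 1
  -- the block: every index in [a, b) gets bucket d
  have hcongr : ∀ (acc : PySem.Dict String Int) (ik : Int × (String × Int)),
      ik ∈ PySem.List.enumerate ((L.drop a).take (b - a)) ((a : Int) + 1) →
      acc.insert ik.2.1 (pvA (N : Int) ik.1) = acc.insert ik.2.1 (d : Int) := by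
    intro acc ik hmem
    rw [PySem.List.mem_enumerate_iff] at hmem
    obtain ⟨k, hk, hik⟩ := hmem
    rw [hlen] at hk
    have hik1 : ik.1 = ((a + k : Nat) : Int) + 1 := by rw [hik]; push_cast; ring
    rw [hik1, pv_bucket_eq N (a + k) d h1 h10 hN (by omega) (by omega)]
  rw [PySem.List.foldl_congr_mem _ _ _ _ hcongr]
  exact pv_foldl_enumerate_snd _ _ (fun out (kv : String × Int) => out.insert kv.1 (d : Int)) o

-- B's Int boundary equals the Nat boundary
lemma pv_e_eq (N : Nat) (d : Nat) :
    PySem.Int.floordiv ((N : Int) * (d : Int) + 9) 10 = (pvC N d : Int) := by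
  have h : (N : Int) * (d : Int) + 9 = ((N * d + 9 : Nat) : Int) := by push_cast; ring
  rw [h]
  unfold pvC
  exact_mod_cast PySem.Int.floordiv_natCast (N * d + 9) 10

lemma pv_e_eq' (N : Nat) (d : Nat) (di : Int) (h : di = (d : Int)) :
    PySem.Int.floordiv ((N : Int) * di + 9) 10 = (pvC N d : Int) := by
  subst h; exact pv_e_eq N d

-- B's loop body, as a named function (definitionally the lambda in the port of B)
def pvFB (L : List (String × Int)) (st : PySem.Dict String Int × Int) (d : Int) :
    PySem.Dict String Int × Int :=
  let start := st.2
  let e := PySem.Int.floordiv ((L.length : Int) * d + 9) 10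
  ((PySem.List.slice L (some start) (some e)).foldl
    (fun (out : PySem.Dict String Int) kv => out.insert kv.1 d) st.1, e)

-- the chained equivalence: A's remaining fold from boundary 10-k equals B's remaining loop
lemma pv_chain (L : List (String × Int)) (hN : 0 < L.length) :
    ∀ k : Nat, k ≤ 10 → ∀ o : PySem.Dict String Int,
    (PySem.List.enumerate (L.drop (pvC L.length (10 - k))) ((pvC L.length (10 - k) : Int) + 1)).foldl
        (fun out ik => out.insert ik.2.1 (pvA (L.length : Int) ik.1)) o
      = ((PySem.List.pyRange (((10 - k : Nat) : Int) + 1) 11 1).foldl (pvFB L)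
          (o, (pvC L.length (10 - k) : Int))).1 := by
  intro k
  induction k with
  | zero =>
    intro _ o
    simp [pvC_ten, PySem.List.pyRange_one_eq_nil, PySem.List.enumerate_nil]
  | succ k ih =>
    intro hk o
    have hd : 10 - k = (10 - (k + 1)) + 1 := by omega
    set d := 10 - (k + 1) with hddef
    have hd9 : d ≤ 9 := by omega
    have hcast : ((d : Int) + 1) = ((d + 1 : Nat) : Int) := by push_cast; ring
    -- unroll one iteration of B's loop
    rw [PySem.List.pyRange_one_cons (by omega), List.foldl_cons]
    have hfb : pvFB L (o, (pvC L.length d : Int)) ((d : Int) + 1)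
        = (((L.drop (pvC L.length d)).take (pvC L.length (d + 1) - pvC L.length d)).foldl
            (fun (out : PySem.Dict String Int) kv => out.insert kv.1 ((d + 1 : Nat) : Int)) o,
           (pvC L.length (d + 1) : Int)) := by
      unfold pvFB
      rw [pv_e_eq' L.length (d + 1) ((d : Int) + 1) hcast]
      show (List.foldl (fun (out : PySem.Dict String Int) kv => out.insert kv.1 ((d : Int) + 1)) o
          (PySem.List.slice L (some ((pvC L.length d : Nat) : Int)) (some ((pvC L.length (d + 1) : Nat) : Int))),
          ((pvC L.length (d + 1) : Nat) : Int)) = _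
      rw [PySem.List.slice_natCast, hcast]
    rw [hfb]
    -- one decile step on A's side
    have hstep := pv_step L (d + 1) (by omega) (by omega) hN o
    rw [Nat.add_sub_cancel] at hstep
    rw [hstep]
    have := ih (by omega)
      (((L.drop (pvC L.length d)).take (pvC L.length (d + 1) - pvC L.length d)).foldl
        (fun (out : PySem.Dict String Int) kv => out.insert kv.1 ((d + 1 : Nat) : Int)) o)
    rw [hd] at this
    rw [this, hcast]

-- ===== VERDICT (by name: the statement is the Claim_ definition above) =====
theorem decile_map_spec : Claim_equal_decile_map := by
  intro value_items _
  unfold Spec_decile_map decile_map decile_map_alt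
  set L := PySem.List.sorted2 value_items (fun x => x.2) (fun x => x.1) with hL
  by_cases h0 : L.length = 0
  · simp [h0]
  · have hN : 0 < L.length := Nat.pos_of_ne_zero h0
    have hne : ¬ ((L.length : Int) == 0) = true := by
      simp only [beq_iff_eq]
      exact_mod_cast h0
    simp only [hne]
    have hmain := pv_chain L hN 10 (le_refl 10) PySem.Dict.empty
    simp only [Nat.sub_self, pvC_zero, List.drop_zero, Nat.cast_zero, zero_add] at hmain
    exact congrArg PySem.Dict.items hmain
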